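-- pv_equiv track=rewrite | github.com/kh277/BOJ | 백준/Silver/7175. Geopeitus/Geopeitus.py | solve
-- ===== SOURCE A (Python) =====
-- def solve(string, N, x):
--     val = [i[0] for i in x]
--     numX = dict()
--     for i in range(N):
--         numX[x[i][0]] = x[i][1].split(",")
--     posX = dict()
--
--     for i in range(len(string)):
--         for j in range(N):
--             if string[i] == x[j][0]:
--                 if x[j][0] in posX:
--                     posX[x[j][0]].append(i)
--                 else:
--                     posX[x[j][0]] = [i]
--
--     result = []
--     if N == 1:
--         for i in range(len(numX[val[0]])):
--             temp = string[:]
--             temp = temp.replace(val[0], numX[val[0]][i])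
--             result.append(temp)
--     elif N == 2:
--         for i in range(len(numX[val[0]])):
--             for j in range(len(numX[val[1]])):
--                 temp = string[:]
--                 temp = temp.replace(val[0], numX[val[0]][i])
--                 temp = temp.replace(val[1], numX[val[1]][j])
--                 result.append(temp)
--     else:
--         for i in range(len(numX[val[0]])):
--             for j in range(len(numX[val[1]])):
--                 for k in range(len(numX[val[2]])):
--                     temp = string[:]
--                     temp = temp.replace(val[0], numX[val[0]][i])
--                     temp = temp.replace(val[1], numX[val[1]][j])
--                     temp = temp.replace(val[2], numX[val[2]][k])
--                     result.append(temp)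
--
--     return result
-- ===== SOURCE B (Python) =====
-- def solve(string, N, x):
--     numX = {}
--     for i in range(N):
--         numX[x[i][0]] = x[i][1].split(",")
--     k0 = x[0][0]
--     results = [string.replace(k0, r) for r in numX[k0]]
--     for i in range(1, min(N, 3)):
--         k = x[i][0]
--         results = [t.replace(k, r) for t in results for r in numX[k]]
--     return results
-- ===== Notes on version B (the rewrite author's own statement) =====
-- stated objective: simpler
-- what changed: B drops the dead posX position-scan and replaces A's three hard-coded nesting depths (N==1/N==2/else) by substituting the first placeholder and then folding one substitution comprehension per remaining key (up to three) over the growing result list.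
import Mathlib
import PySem

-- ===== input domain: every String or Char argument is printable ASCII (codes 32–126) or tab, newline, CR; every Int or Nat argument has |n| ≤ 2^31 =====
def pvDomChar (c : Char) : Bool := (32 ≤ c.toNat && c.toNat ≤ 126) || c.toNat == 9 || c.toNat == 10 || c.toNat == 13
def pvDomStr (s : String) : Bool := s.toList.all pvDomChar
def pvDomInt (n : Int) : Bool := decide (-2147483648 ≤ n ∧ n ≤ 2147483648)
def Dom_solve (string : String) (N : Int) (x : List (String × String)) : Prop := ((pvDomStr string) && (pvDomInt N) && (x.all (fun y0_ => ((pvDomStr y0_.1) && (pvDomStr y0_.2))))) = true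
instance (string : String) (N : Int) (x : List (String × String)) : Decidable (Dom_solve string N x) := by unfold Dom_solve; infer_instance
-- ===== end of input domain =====

-- B substitutes the first placeholder, then folds one substitution pass per remaining key
-- (up to three) over the growing list, replacing A's dead posX scan and its three
-- hand-unrolled nesting depths; objective: simpler.

-- ===== PORT A =====
def solve (string : String) (N : Int) (x : List (String × String)) : List String :=
  let val := x.map Prod.fst
  let numX : PySem.Dict String (List String) :=
    (PySem.List.pyRange 0 N 1).foldl (fun d i =>
      let xi := PySem.List.pyGetD x i ("", "")
      d.insert xi.1 ((PySem.Str.split? xi.2 ",").getD [])) PySem.Dict.empty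
  let _posX : PySem.Dict String (List Int) :=
    (PySem.List.pyRange 0 (string.toList.length : Int) 1).foldl (fun d i =>
      (PySem.List.pyRange 0 N 1).foldl (fun d j =>
        let xj := PySem.List.pyGetD x j ("", "")
        if ((PySem.Str.pyGet? string i).map (fun c => String.ofList [c])).getD "" = xj.1 then
          match d.get? xj.1 with
          | some l => d.insert xj.1 (l ++ [i])
          | none   => d.insert xj.1 [i]
        else d) d) PySem.Dict.empty
  let result : List String := []
  if N == 1 then
    let opts0 := numX.getD (PySem.List.pyGetD val 0 "") []
    (PySem.List.pyRange 0 (opts0.length : Int) 1).foldl (fun res i =>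
      res ++ [PySem.Str.replace string (PySem.List.pyGetD val 0 "") (PySem.List.pyGetD opts0 i "")]) result
  else if N == 2 then
    let opts0 := numX.getD (PySem.List.pyGetD val 0 "") []
    let opts1 := numX.getD (PySem.List.pyGetD val 1 "") []
    (PySem.List.pyRange 0 (opts0.length : Int) 1).foldl (fun res i =>
      (PySem.List.pyRange 0 (opts1.length : Int) 1).foldl (fun res j =>
        res ++ [PySem.Str.replace
                  (PySem.Str.replace string (PySem.List.pyGetD val 0 "") (PySem.List.pyGetD opts0 i ""))
                  (PySem.List.pyGetD val 1 "") (PySem.List.pyGetD opts1 j "")]) res) result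
  else
    let opts0 := numX.getD (PySem.List.pyGetD val 0 "") []
    let opts1 := numX.getD (PySem.List.pyGetD val 1 "") []
    let opts2 := numX.getD (PySem.List.pyGetD val 2 "") []
    (PySem.List.pyRange 0 (opts0.length : Int) 1).foldl (fun res i =>
      (PySem.List.pyRange 0 (opts1.length : Int) 1).foldl (fun res j =>
        (PySem.List.pyRange 0 (opts2.length : Int) 1).foldl (fun res k =>
          res ++ [PySem.Str.replace
                    (PySem.Str.replace
                      (PySem.Str.replace string (PySem.List.pyGetD val 0 "") (PySem.List.pyGetD opts0 i ""))
                      (PySem.List.pyGetD val 1 "") (PySem.List.pyGetD opts1 j ""))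
                    (PySem.List.pyGetD val 2 "") (PySem.List.pyGetD opts2 k "")]) res) res) result

-- ===== PORT B =====
def solve_alt (string : String) (N : Int) (x : List (String × String)) : List String :=
  let numX : PySem.Dict String (List String) :=
    (PySem.List.pyRange 0 N 1).foldl (fun d i =>
      let xi := PySem.List.pyGetD x i ("", "")
      d.insert xi.1 ((PySem.Str.split? xi.2 ",").getD [])) PySem.Dict.empty
  let k0 := (PySem.List.pyGetD x 0 ("", "")).1
  let results := (numX.getD k0 []).map (fun r => PySem.Str.replace string k0 r)
  (PySem.List.pyRange 1 (min N 3) 1).foldl (fun results i =>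
    let k := (PySem.List.pyGetD x i ("", "")).1
    results.flatMap (fun t => (numX.getD k []).map (fun r => PySem.Str.replace t k r))) results

-- ===== PRECONDITION & SPEC =====
-- Pre_ excludes exactly the inputs where A raises: N <= 0 (IndexError/KeyError on val[0]/numX)
-- and N > len(x) (IndexError building numX).
def Pre_solve (string : String) (N : Int) (x : List (String × String)) : Prop :=
  1 ≤ N ∧ N ≤ x.length
instance (string : String) (N : Int) (x : List (String × String)) : Decidable (Pre_solve string N x) := by unfold Pre_solve; infer_instance
def pvWitness_solve : String × Int × (List (String × String)) := ("ab", 2, [("a", "1,2"), ("b", "3")])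

def Spec_solve (string : String) (N : Int) (x : List (String × String)) (out : List String) : Prop := out = solve_alt string N x
instance (string : String) (N : Int) (x : List (String × String)) (out : List String) : Decidable (Spec_solve string N x out) := by unfold Spec_solve; infer_instance

-- ===== CLAIM (what is proved, stated in full; the proofs are below) =====
def Claim_equal_solve : Prop := ∀ (string : String) (N : Int) (x : List (String × String)), Dom_solve string N x → Pre_solve string N x → Spec_solve string N x (solve string N x)
-- ===== LEMMAS AND PROOFS =====

-- A's 'for i in range(len(opts)): result.append(f(opts[i]))' loop is init ++ opts.map f
lemma foldA_map (opts : List String) (f : String → String) (res : List String) :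
    (PySem.List.pyRange 0 (opts.length : Int) 1).foldl
      (fun res i => res ++ [f (PySem.List.pyGetD opts i "")]) res = res ++ opts.map f := by
  rw [PySem.List.foldl_pyRange_zero_pyGetD' opts "" (fun acc v => acc ++ [f v]) res]
  exact PySem.List.foldl_append_singleton_eq_map f opts res

-- a fold whose body extends the accumulator by a block is init ++ flatMap
lemma foldl_body_flat {α : Type} (l : List α) (G : List String → α → List String)
    (g : α → List String) (h : ∀ res v, G res v = res ++ g v) (init : List String) :
    l.foldl G init = init ++ l.flatMap g := by
  induction l generalizing init with
  | nil => simp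
  | cons a t ih => simp [h, ih, List.append_assoc]

lemma pyGetD_one_cons {α : Type} (a b : α) (l : List α) (d : α) :
    PySem.List.pyGetD (a :: b :: l) 1 d = b := by simp [pysem]

lemma pyGetD_two_cons {α : Type} (a b c : α) (l : List α) (d : α) :
    PySem.List.pyGetD (a :: b :: c :: l) 2 d = c := by simp [pysem]

-- A's single loop (branch N == 1)
lemma A1gen (s k0 : String) (o0 : List String) (init : List String) :
    (PySem.List.pyRange 0 (o0.length : Int) 1).foldl
      (fun res i => res ++ [PySem.Str.replace s k0 (PySem.List.pyGetD o0 i "")]) init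
    = init ++ o0.map (fun v => PySem.Str.replace s k0 v) :=
  foldA_map o0 _ init

-- A's double loop (branch N == 2)
lemma A2gen (s k0 k1 : String) (o0 o1 : List String) (init : List String) :
    (PySem.List.pyRange 0 (o0.length : Int) 1).foldl
      (fun res i => (PySem.List.pyRange 0 (o1.length : Int) 1).foldl
        (fun res j => res ++ [PySem.Str.replace
          (PySem.Str.replace s k0 (PySem.List.pyGetD o0 i ""))
          k1 (PySem.List.pyGetD o1 j "")]) res) init
    = init ++ o0.flatMap (fun v => o1.map (fun w =>
        PySem.Str.replace (PySem.Str.replace s k0 v) k1 w)) := by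
  rw [PySem.List.foldl_pyRange_zero_pyGetD' o0 ""
    (fun res v => (PySem.List.pyRange 0 (o1.length : Int) 1).foldl
      (fun res j => res ++ [PySem.Str.replace (PySem.Str.replace s k0 v)
        k1 (PySem.List.pyGetD o1 j "")]) res) init]
  exact foldl_body_flat o0 _
    (fun v => o1.map (fun w => PySem.Str.replace (PySem.Str.replace s k0 v) k1 w))
    (fun res v => foldA_map o1
      (fun w => PySem.Str.replace (PySem.Str.replace s k0 v) k1 w) res) init

-- A's triple loop (else branch)
lemma A3gen (s k0 k1 k2 : String) (o0 o1 o2 : List String) (init : List String) :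
    (PySem.List.pyRange 0 (o0.length : Int) 1).foldl
      (fun res i => (PySem.List.pyRange 0 (o1.length : Int) 1).foldl
        (fun res j => (PySem.List.pyRange 0 (o2.length : Int) 1).foldl
          (fun res k => res ++ [PySem.Str.replace (PySem.Str.replace
            (PySem.Str.replace s k0 (PySem.List.pyGetD o0 i ""))
            k1 (PySem.List.pyGetD o1 j ""))
            k2 (PySem.List.pyGetD o2 k "")]) res) res) init
    = init ++ o0.flatMap (fun v => o1.flatMap (fun w => o2.map (fun u =>
        PySem.Str.replace (PySem.Str.replace (PySem.Str.replace s k0 v) k1 w) k2 u))) := by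
  rw [PySem.List.foldl_pyRange_zero_pyGetD' o0 ""
    (fun res v => (PySem.List.pyRange 0 (o1.length : Int) 1).foldl
      (fun res j => (PySem.List.pyRange 0 (o2.length : Int) 1).foldl
        (fun res k => res ++ [PySem.Str.replace (PySem.Str.replace
          (PySem.Str.replace s k0 v) k1 (PySem.List.pyGetD o1 j ""))
          k2 (PySem.List.pyGetD o2 k "")]) res) res) init]
  exact foldl_body_flat o0 _ _ (fun res v => A2gen (PySem.Str.replace s k0 v) k1 k2 o1 o2 res) init

-- ===== VERDICT (by name: the statement is the Claim_ definition above) =====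
theorem solve_spec : Claim_equal_solve := by
  intro string N x _hDom hPre
  obtain ⟨h1, h2⟩ := hPre
  unfold Spec_solve solve solve_alt
  by_cases hN1 : N = 1
  · subst hN1
    match x, (by omega : 1 ≤ (x.length : Int)) with
    | x0 :: xs, _ =>
      simp only [A1gen]
      simp [show PySem.List.pyRange 0 1 1 = [0] by decide, show PySem.List.pyRange 1 1 1 = ([] : List Int) by decide]
  · by_cases hN2 : N = 2
    · subst hN2
      match x, (by omega : 2 ≤ (x.length : Int)) with
      | x0 :: x1 :: xs, _ =>
        simp only [A2gen, PySem.List.pyGetD_zero_cons, pyGetD_one_cons, List.map_cons]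
        simp [show PySem.List.pyRange 0 2 1 = [0, 1] by decide, show PySem.List.pyRange 1 2 1 = [(1:Int)] by decide, PySem.List.pyGetD_zero_cons, pyGetD_one_cons, List.flatMap_map]
    · have hN3 : 3 ≤ N := by omega
      match x, (by omega : 3 ≤ (x.length : Int)) with
      | x0 :: x1 :: x2 :: xs, _ =>
        have hmin : min N 3 = 3 := by omega
        simp only [A3gen, PySem.List.pyGetD_zero_cons, pyGetD_one_cons, pyGetD_two_cons,
          List.map_cons]
        simp [hmin, show PySem.List.pyRange 1 3 1 = [(1:Int), 2] by decide, hN1, hN2, pyGetD_one_cons, pyGetD_two_cons,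
          List.flatMap_map, List.flatMap_assoc]
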